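-- pv_equiv track=rewrite | github.com/pypi-data/pypi-mirror-340 | packages/lpce/lpce-0.1.0-py3-none-any.whl/lpce/cleanup/remove_dna_rna.py | contains_dna_rna_sequence
-- ===== SOURCE A (Python) =====
-- def contains_dna_rna_sequence(content: str) -> bool:
--     """
--     Checks if the content of a PDB file contains DNA or RNA sequences.
--
--     Args:
--         content (str): The content of the PDB file.
--
--     Returns:
--         bool: True if the file contains DNA/RNA sequences, otherwise False.
--     """
--     nucleotides = {
--         "A",
--         "T",
--         "G",
--         "C",
--         "U",
--         "DA",
--         "DT",
--         "DG",
--         "DC",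
--         "DU",
--         "RA",
--         "RT",
--         "RG",
--         "RC",
--         "RU",
--     }
--     seqres_lines = [line for line in content.splitlines() if line.startswith("SEQRES")]
--     atom_lines = [line for line in content.splitlines() if line.startswith("ATOM")]
--
--     # Check SEQRES lines
--     for line in seqres_lines:
--         sequence = line[19:].split()
--         if any(n in nucleotides for n in sequence):
--             return True
--
--     # Check ATOM lines for specific nucleotides
--     for line in atom_lines:
--         if line[17:22].strip() in nucleotides:
--             return True
--
--     return False
-- ===== SOURCE B (Python) =====
-- def contains_dna_rna_sequence(content: str) -> bool:
--     """Single pass over the lines: each line is judged directly, no filtered lists."""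
--     nucleotides = {
--         "A", "T", "G", "C", "U",
--         "DA", "DT", "DG", "DC", "DU",
--         "RA", "RT", "RG", "RC", "RU",
--     }
--     return any(
--         (line.startswith("SEQRES")
--          and any(t in nucleotides for t in line[19:].split()))
--         or (line.startswith("ATOM")
--             and line[17:22].strip() in nucleotides)
--         for line in content.splitlines()
--     )
-- ===== Notes on version B (the rewrite author's own statement) =====
-- stated objective: simpler
-- what changed: B makes a single pass over the lines with one any() whose predicate judges each line directly, instead of materializing two filtered lists and scanning each in its own loop.
import Mathlib
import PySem

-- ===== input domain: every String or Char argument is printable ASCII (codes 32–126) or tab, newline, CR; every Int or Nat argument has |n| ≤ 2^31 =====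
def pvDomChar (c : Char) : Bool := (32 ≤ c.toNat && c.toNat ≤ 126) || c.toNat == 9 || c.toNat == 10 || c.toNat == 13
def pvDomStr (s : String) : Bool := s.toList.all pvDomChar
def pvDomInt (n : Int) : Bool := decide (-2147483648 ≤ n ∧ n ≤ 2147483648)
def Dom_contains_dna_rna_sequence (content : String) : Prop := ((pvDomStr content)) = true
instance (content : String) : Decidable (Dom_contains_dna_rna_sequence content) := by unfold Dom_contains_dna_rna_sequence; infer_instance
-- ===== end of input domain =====

-- ===== PORT A =====
-- B changes: one pass judging each line directly instead of two filtered lists each scanned by its own loop (objective: simpler).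
def pvNucleotides : PySem.Set String := PySem.Set.ofList
  ["A", "T", "G", "C", "U", "DA", "DT", "DG", "DC", "DU", "RA", "RT", "RG", "RC", "RU"]

def contains_dna_rna_sequence (content : String) : Bool :=
  let seqres_lines := (PySem.Str.splitlines content).filter
    (fun line => PySem.Str.startswith line "SEQRES")
  let atom_lines := (PySem.Str.splitlines content).filter
    (fun line => PySem.Str.startswith line "ATOM")
  -- 'for line in …: if …: return True' twice, then 'return False'
  if seqres_lines.any (fun line =>
      (PySem.Str.split₀ (PySem.Str.slice line (some 19) none)).any
        (fun n => pvNucleotides.contains n)) then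
    true
  else if atom_lines.any (fun line =>
      pvNucleotides.contains (PySem.Str.strip (PySem.Str.slice line (some 17) (some 22)))) then
    true
  else
    false

-- ===== PORT B =====
def contains_dna_rna_sequence_alt (content : String) : Bool :=
  (PySem.Str.splitlines content).any (fun line =>
    (PySem.Str.startswith line "SEQRES" &&
      (PySem.Str.split₀ (PySem.Str.slice line (some 19) none)).any
        (fun t => pvNucleotides.contains t))
    || (PySem.Str.startswith line "ATOM" &&
      pvNucleotides.contains (PySem.Str.strip (PySem.Str.slice line (some 17) (some 22)))))

-- ===== PRECONDITION & SPEC =====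
def Spec_contains_dna_rna_sequence (content : String) (out : Bool) : Prop := out = contains_dna_rna_sequence_alt content
instance (content : String) (out : Bool) : Decidable (Spec_contains_dna_rna_sequence content out) := by unfold Spec_contains_dna_rna_sequence; infer_instance

-- ===== CLAIM (what is proved, stated in full; the proofs are below) =====
def Claim_equal_contains_dna_rna_sequence : Prop := ∀ (content : String), Dom_contains_dna_rna_sequence content → Spec_contains_dna_rna_sequence content (contains_dna_rna_sequence content)

-- ===== LEMMAS AND PROOFS =====
theorem pv_any_or {α : Type} (l : List α) (p q : α → Bool) :
    (l.any p || l.any q) = l.any (fun x => p x || q x) := by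
  induction l with
  | nil => rfl
  | cons x xs ih =>
    simp only [List.any_cons, ← ih]
    cases p x <;> cases q x <;> cases xs.any p <;> cases xs.any q <;> rfl

-- ===== VERDICT (by name: the statement is the Claim_ definition above) =====
theorem contains_dna_rna_sequence_spec : Claim_equal_contains_dna_rna_sequence := by
  intro content _
  unfold Spec_contains_dna_rna_sequence contains_dna_rna_sequence contains_dna_rna_sequence_alt
  simp only [List.any_filter]
  rw [← pv_any_or]
  split_ifs with h1 h2
  · rw [h1, Bool.true_or]
  · simp only [Bool.not_eq_true] at h1
    rw [h1, h2, Bool.false_or]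
  · simp only [Bool.not_eq_true] at h1 h2
    rw [h1, h2, Bool.or_self]
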